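-- pv_equiv track=rewrite | github.com/customink/serverless-wsgi | wsgi.py | all_casings
-- ===== SOURCE A (Python) =====
-- def all_casings(input_string):
--     """
--     Permute all casings of a given string.
--     A pretty algoritm, via @Amber
--     http://stackoverflow.com/questions/6792803/finding-all-possible-case-permutations-in-python
--     """
--     if not input_string:
--         yield ""
--     else:
--         first = input_string[:1]
--         if first.lower() == first.upper():
--             for sub_casing in all_casings(input_string[1:]):
--                 yield first + sub_casing
--         else:
--             for sub_casing in all_casings(input_string[1:]):
--                 yield first.lower() + sub_casing
--                 yield first.upper() + sub_casing
-- ===== SOURCE B (Python) =====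
-- def all_casings(input_string):
--     # Table-of-options + iterative Cartesian product (built right-to-left), instead of recursion.
--     options = []
--     for c in input_string:
--         options.append([c] if c.lower() == c.upper() else [c.lower(), c.upper()])
--     results = [""]
--     for opts in reversed(options):
--         results = [x + s for s in results for x in opts]
--     yield from results
-- ===== Notes on version B (the rewrite author's own statement) =====
-- stated objective: alternative
-- what changed: Replaced the recursive generator with a per-character option table and an iterative Cartesian-product fold over the reversed table.
import Mathlib
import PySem

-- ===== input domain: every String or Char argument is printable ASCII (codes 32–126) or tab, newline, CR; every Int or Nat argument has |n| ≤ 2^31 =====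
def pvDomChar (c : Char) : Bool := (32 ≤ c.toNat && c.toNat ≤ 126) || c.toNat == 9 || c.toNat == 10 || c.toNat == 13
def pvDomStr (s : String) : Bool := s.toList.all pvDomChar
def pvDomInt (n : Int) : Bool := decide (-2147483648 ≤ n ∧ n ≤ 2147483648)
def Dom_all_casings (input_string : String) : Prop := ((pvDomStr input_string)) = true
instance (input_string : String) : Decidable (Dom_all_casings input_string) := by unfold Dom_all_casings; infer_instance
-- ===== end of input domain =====

-- B replaces A's recursive generator with a per-character option table and an iterative Cartesian-product fold (alternative structure, same cost).


-- ===== PORT A =====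
-- A: recursion on the characters; one-char strings compared via Chars.lower/upper (exact on ASCII domain)
def all_casings_chars : List Char → List (List Char)
  | [] => [[]]
  | c :: rest =>
    if PySem.Chars.lower [c] = PySem.Chars.upper [c] then
      (all_casings_chars rest).flatMap (fun sub => [[c] ++ sub])
    else
      (all_casings_chars rest).flatMap (fun sub =>
        [PySem.Chars.lower [c] ++ sub, PySem.Chars.upper [c] ++ sub])

def all_casings (input_string : String) : List String :=
  (all_casings_chars input_string.toList).map String.mk

-- ===== PORT B =====
-- B: build per-character option table, then fold the reversed table, extending each result on the left
def pvOptionsOf (c : Char) : List (List Char) :=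
  if PySem.Chars.lower [c] = PySem.Chars.upper [c] then [[c]]
  else [PySem.Chars.lower [c], PySem.Chars.upper [c]]

def all_casings_alt (input_string : String) : List String :=
  let options := input_string.toList.map pvOptionsOf
  let results := options.reverse.foldl
    (fun res opts => res.flatMap (fun s => opts.map (fun x => x ++ s))) [[]]
  results.map String.mk

-- ===== PRECONDITION & SPEC =====
def Spec_all_casings (input_string : String) (out : List String) : Prop := out = all_casings_alt input_string
instance (input_string : String) (out : List String) : Decidable (Spec_all_casings input_string out) := by unfold Spec_all_casings; infer_instance

-- ===== CLAIM (what is proved, stated in full; the proofs are below) =====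
def Claim_equal_all_casings : Prop := ∀ (input_string : String), Dom_all_casings input_string → Spec_all_casings input_string (all_casings input_string)

-- ===== LEMMAS AND PROOFS =====

-- ===== VERDICT (by name: the statement is the Claim_ definition above) =====
theorem pv_chars_eq (l : List Char) :
    (l.map pvOptionsOf).reverse.foldl
      (fun res opts => res.flatMap (fun s => opts.map (fun x => x ++ s))) [[]]
    = all_casings_chars l := by
  induction l with
  | nil => rfl
  | cons c rest ih =>
    simp only [List.map_cons, List.reverse_cons, List.foldl_append, List.foldl_cons,
      List.foldl_nil, ih, all_casings_chars, pvOptionsOf]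
    split <;> simp [List.flatMap]

-- ===== VERDICT (by name: the statement is the Claim_ definition above) =====
theorem all_casings_spec : Claim_equal_all_casings := by
  intro s _
  show _ = all_casings_alt s
  unfold all_casings all_casings_alt
  simp only [pv_chars_eq]
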